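-- pv_equiv track=rewrite | github.com/AdamZhouSE/pythonHomework | Code/CodeRecords/2185/60763/289044.py | binaryNth47Number
-- ===== SOURCE A (Python) =====
-- def binaryNth47Number(s):
--     i = 0
--     while pow(2, i) - 2 < s:
--         i += 1
--     i -= 1
--     k = s - pow(2, i) + 2
--     a = ''
--     while i >= 1:
--         if k > pow(2,i-1):
--             k -= pow(2,i-1)
--             a = a+'7'
--             i -=1
--             pass
--         else:
--             a = a+'4'
--             i-=1
--     return a
-- ===== SOURCE B (Python) =====
-- def binaryNth47Number(s):
--     if s < 0:
--         return ''
--     return bin(s + 1)[3:].translate(str.maketrans('01', '47'))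
-- ===== Notes on version B (the rewrite author's own statement) =====
-- stated objective: simpler
-- what changed: B replaces A's two while-loops (length search by repeated pow, then per-position pow comparison and subtraction) with a closed form: the binary digits of s+1 after the leading bit, with each bit translated to the corresponding lucky digit.
import Mathlib
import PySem

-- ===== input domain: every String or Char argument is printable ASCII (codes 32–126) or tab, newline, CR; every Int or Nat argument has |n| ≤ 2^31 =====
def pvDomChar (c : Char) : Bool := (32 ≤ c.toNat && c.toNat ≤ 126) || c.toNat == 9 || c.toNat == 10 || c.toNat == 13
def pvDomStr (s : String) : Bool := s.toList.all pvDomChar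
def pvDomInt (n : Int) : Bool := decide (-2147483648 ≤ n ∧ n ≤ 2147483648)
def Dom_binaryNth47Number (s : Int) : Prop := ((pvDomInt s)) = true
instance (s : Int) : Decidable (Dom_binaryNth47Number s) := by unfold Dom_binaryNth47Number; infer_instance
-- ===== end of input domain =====

-- B computes the answer in closed form (binary of s+1, leading 1 dropped, 0/1 ↦ 4/7)
-- instead of A's length-search loop plus per-position pow/subtraction loop (objective: simpler).

-- ===== PORT A =====
-- pow(2, i) for Int i.  Python returns a float for i < 0; that only happens in A when the
-- second while loop is never entered, so the (then unused) value for i < 0 is irrelevant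
-- to the result; we return 0 there.  Exact for i ≥ 0.
def pyPow2 (i : Int) : Int := if 0 ≤ i then 2 ^ i.toNat else 0

-- first while loop: `while pow(2, i) - 2 < s: i += 1`
def loop1A (s : Int) (i : Nat) : Nat :=
  if (2 : Int) ^ i - 2 < s then loop1A s (i + 1) else i
termination_by (s + 2 - 2 ^ i).toNat
decreasing_by
  have h1 : (2 : Int) ^ i < 2 ^ (i + 1) := by
    have : (2 : Int) ^ (i + 1) = 2 ^ i * 2 := pow_succ 2 i
    have hp : (0 : Int) < 2 ^ i := pow_pos (by norm_num) i
    omega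
  omega

-- second while loop: `while i >= 1: …`; i is always an Int ≥ -1 at loop entry, and the
-- loop runs only while i ≥ 1, so recursing on i.toNat is exact (i = -1 and i = 0 both skip it).
def loop2A (k : Int) (i : Nat) (a : String) : String :=
  match i with
  | 0 => a
  | j + 1 =>
    if k > 2 ^ j then loop2A (k - 2 ^ j) j (a ++ "7")
    else loop2A k j (a ++ "4")

def binaryNth47Number (s : Int) : String :=
  let i1 : Nat := loop1A s 0
  let i2 : Int := (i1 : Int) - 1
  let k : Int := s - pyPow2 i2 + 2
  loop2A k i2.toNat ""

-- ===== PORT B =====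
-- the digit string of Python's bin(n) (empty for n = 0; bin(n) = "0b" ++ binChars n for n ≥ 1)
def binChars (n : Nat) : List Char :=
  if n = 0 then [] else binChars (n / 2) ++ [if n % 2 = 1 then '1' else '0']
termination_by n
decreasing_by exact Nat.div_lt_self (by omega) (by omega)

-- translate table str.maketrans('01','47')
def tr47 (c : Char) : Char := if c = '0' then '4' else if c = '1' then '7' else c

-- bin(s+1)[3:] drops "0b" and the leading '1', i.e. drops the first char of binChars (s+1)
def binaryNth47Number_alt (s : Int) : String :=
  if s < 0 then ""
  else String.ofList ((((binChars (s + 1).toNat).drop 1)).map tr47)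

-- ===== PRECONDITION & SPEC =====
def Spec_binaryNth47Number (s : Int) (out : String) : Prop := out = binaryNth47Number_alt s
instance (s : Int) (out : String) : Decidable (Spec_binaryNth47Number s out) := by unfold Spec_binaryNth47Number; infer_instance

-- ===== CLAIM (what is proved, stated in full; the proofs are below) =====
def Claim_equal_binaryNth47Number : Prop := ∀ (s : Int), Dom_binaryNth47Number s → Spec_binaryNth47Number s (binaryNth47Number s)

-- ===== LEMMAS AND PROOFS =====

-- MSB-first 4/7 writing of r with exactly i digits (0 ≤ r < 2^i)
def pad47 (i : Nat) (r : Nat) : List Char :=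
  match i with
  | 0 => []
  | j + 1 => if 2 ^ j ≤ r then '7' :: pad47 j (r - 2 ^ j) else '4' :: pad47 j r

lemma loop1A_inv (s : Int) (i : Nat) (h : (2 : Int) ^ i ≤ s + 1) :
    1 ≤ loop1A s i ∧ (2 : Int) ^ (loop1A s i - 1) ≤ s + 1 ∧ s + 1 < 2 ^ (loop1A s i) := by
  induction i using loop1A.induct s with
  | case1 i hlt ih =>
    rw [loop1A, if_pos hlt]
    by_cases h2 : (2 : Int) ^ (i + 1) ≤ s + 1
    · exact ih h2
    · rw [loop1A, if_neg (by omega)]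
      refine ⟨by omega, by simpa using (by omega : (2 : Int) ^ i ≤ s + 1), by omega⟩
  | case2 i hge =>
    exfalso; omega

lemma loop2A_eq (i : Nat) : ∀ (r : Nat) (a : String), r < 2 ^ i →
    loop2A ((r : Int) + 1) i a = a ++ String.ofList (pad47 i r) := by
  induction i with
  | zero =>
    intro r a hr
    rw [loop2A]
    apply String.toList_injective
    simp [pad47]
  | succ j ih =>
    intro r a hr
    have hpow : (0:Nat) < 2 ^ j := Nat.two_pow_pos j
    have hcast : (((2:Nat) ^ j : Nat) : Int) = 2 ^ j := by push_cast; ring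
    by_cases hc : 2 ^ j ≤ r
    · have h1 : ((r : Int) + 1) > 2 ^ j := by omega
      have h2 : ((r : Int) + 1) - 2 ^ j = ((r - 2 ^ j : Nat) : Int) + 1 := by omega
      rw [loop2A, if_pos h1, h2, ih (r - 2 ^ j) (a ++ "7") (by rw [pow_succ] at hr; omega),
          pad47, if_pos hc]
      apply String.toList_injective
      simp
    · have h1 : ¬ ((r : Int) + 1) > 2 ^ j := by omega
      rw [loop2A, if_neg h1, ih r (a ++ "4") (by omega), pad47, if_neg hc]
      apply String.toList_injective
      simp

lemma pad47_snoc (j : Nat) : ∀ r : Nat, r < 2 ^ (j + 1) →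
    pad47 (j + 1) r = pad47 j (r / 2) ++ [if r % 2 = 1 then '7' else '4'] := by
  induction j with
  | zero =>
    intro r hr
    interval_cases r <;> simp [pad47]
  | succ j ih =>
    intro r hr
    have hpow : (0:Nat) < 2 ^ j := Nat.two_pow_pos j
    have hps : 2 ^ (j + 1) = 2 ^ j * 2 := pow_succ 2 j
    have hps2 : 2 ^ (j + 2) = 2 ^ (j + 1) * 2 := pow_succ 2 (j+1)
    by_cases hc : 2 ^ (j + 1) ≤ r
    · have hc' : 2 ^ j ≤ r / 2 := by omega
      have e1 : (r - 2 ^ (j + 1)) / 2 = r / 2 - 2 ^ j := by omega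
      have e2 : (r - 2 ^ (j + 1)) % 2 = r % 2 := by omega
      rw [pad47, if_pos hc, ih (r - 2 ^ (j + 1)) (by omega), e1, e2]
      show _ = pad47 (j + 1) (r / 2) ++ _
      rw [pad47, if_pos hc']
      simp
    · have hc' : ¬ 2 ^ j ≤ r / 2 := by omega
      rw [pad47, if_neg hc, ih r (by omega)]
      show _ = pad47 (j + 1) (r / 2) ++ _
      rw [pad47, if_neg hc']
      simp

lemma binChars_ne_nil (n : Nat) (h : n ≠ 0) : binChars n ≠ [] := by
  rw [binChars, if_neg h]
  simp

lemma binChars_eq_pad47 (j : Nat) : ∀ m : Nat, 2 ^ j ≤ m → m < 2 ^ (j + 1) →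
    ((binChars m).drop 1).map tr47 = pad47 j (m - 2 ^ j) := by
  induction j with
  | zero =>
    intro m h1 h2
    have : m = 1 := by omega
    subst this
    simp [binChars, pad47]
  | succ j ih =>
    intro m h1 h2
    have hpow : (0:Nat) < 2 ^ j := Nat.two_pow_pos j
    have hps : 2 ^ (j + 1) = 2 ^ j * 2 := pow_succ 2 j
    have hps2 : 2 ^ (j + 2) = 2 ^ (j + 1) * 2 := pow_succ 2 (j+1)
    have hm0 : m ≠ 0 := by omega
    have hd1 : 2 ^ j ≤ m / 2 := by omega
    have hd2 : m / 2 < 2 ^ (j + 1) := by omega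
    have hne : binChars (m / 2) ≠ [] := binChars_ne_nil _ (by omega)
    have hlen : 1 ≤ (binChars (m / 2)).length := by
      cases hbc : binChars (m / 2) with
      | nil => exact absurd hbc hne
      | cons x xs => simp
    rw [binChars, if_neg hm0, List.drop_append_of_le_length hlen, List.map_append,
        ih (m / 2) hd1 hd2, pad47_snoc j (m - 2 ^ (j + 1)) (by omega)]
    have e1 : (m - 2 ^ (j + 1)) / 2 = m / 2 - 2 ^ j := by omega
    have e2 : (m - 2 ^ (j + 1)) % 2 = m % 2 := by omega
    rw [e1, e2]
    congr 1
    by_cases hp : m % 2 = 1 <;> simp [hp, tr47]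

-- ===== VERDICT (by name: the statement is the Claim_ definition above) =====
theorem binaryNth47Number_spec : Claim_equal_binaryNth47Number := by
  intro s _
  unfold Spec_binaryNth47Number binaryNth47Number_alt
  by_cases hneg : s < 0
  · -- first loop never runs (2^0 - 2 = -1 < s is false), i ends at -1, second loop skipped
    have h1 : loop1A s 0 = 0 := by rw [loop1A, if_neg (by norm_num; omega)]
    show loop2A _ ((loop1A s 0 : Int) - 1).toNat "" = _
    rw [h1]
    simp [loop2A, hneg]
  · rw [not_lt] at hneg
    have h0 : (2 : Int) ^ (0 : Nat) ≤ s + 1 := by simpa using hneg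
    obtain ⟨hge1, hlow, hhigh⟩ := loop1A_inv s 0 h0
    show loop2A (s - pyPow2 ((loop1A s 0 : Int) - 1) + 2) ((loop1A s 0 : Int) - 1).toNat "" = _
    generalize hgen : loop1A s 0 = j at hge1 hlow hhigh ⊢
    obtain ⟨p, rfl⟩ : ∃ p, j = p + 1 := ⟨j - 1, by omega⟩
    have hlow' : (2 : Int) ^ p ≤ s + 1 := by simpa using hlow
    have hpowpos : (0 : Int) < 2 ^ p := pow_pos (by norm_num) p
    have hcast : (((2:Nat) ^ p : Nat) : Int) = 2 ^ p := by push_cast; ring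
    have hcast2 : (((2:Nat) ^ (p+1) : Nat) : Int) = 2 ^ (p+1) := by push_cast; ring
    have hi2nn : (0 : Int) ≤ ((p + 1 : Nat) : Int) - 1 := by omega
    have hpy : pyPow2 (((p + 1 : Nat) : Int) - 1) = 2 ^ p := by
      rw [pyPow2, if_pos hi2nn]
      congr 1
      omega
    set rN : Nat := (s + 1 - 2 ^ p).toNat with hr
    have hrcast : ((rN : Int)) = s + 1 - 2 ^ p := by omega
    have hk : s - pyPow2 (((p + 1 : Nat) : Int) - 1) + 2 = (rN : Int) + 1 := by rw [hpy]; omega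
    have hhigh' : s + 1 < 2 ^ (p + 1) := hhigh
    have hrlt : rN < 2 ^ p := by
      rw [pow_succ] at hhigh'
      omega
    have hi2toNat : (((p + 1 : Nat) : Int) - 1).toNat = p := by omega
    rw [hk, hi2toNat, loop2A_eq p rN "" hrlt]
    -- B side: m := (s+1).toNat satisfies 2^p ≤ m < 2^(p+1) and m - 2^p = rN
    have hmlow : 2 ^ p ≤ (s + 1).toNat := by omega
    have hmhigh : (s + 1).toNat < 2 ^ (p + 1) := by omega
    have hmr : (s + 1).toNat - 2 ^ p = rN := by omega
    rw [if_neg (by omega), binChars_eq_pad47 p (s + 1).toNat hmlow hmhigh, hmr]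
    apply String.toList_injective
    simp
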